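-- pv_equiv track=rewrite | github.com/WissalNaouaii/SmartFleet_MAPPO | create_scenario.py | find_strongly_connected
-- ===== SOURCE A (Python) =====
-- from collections import defaultdict, deque
--
-- def bfs_reachable(start, connections):
--     """Find all edges reachable from start"""
--     visited = set()
--     queue = deque([start])
--     while queue:
--         node = queue.popleft()
--         if node in visited:
--             continue
--         visited.add(node)
--         for neighbor in connections.get(node, []):
--             if neighbor not in visited:
--                 queue.append(neighbor)
--     return visited
--
-- def find_strongly_connected(edges, forward, backward):
--     """Find edges that can reach each other (both directions)"""
--     best_cluster = set()
--     tested = set()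
--
--     for start_edge in edges:
--         if start_edge in tested:
--             continue
--
--         # Find edges reachable FROM this edge
--         reachable_forward = bfs_reachable(start_edge, forward)
--
--         # Find edges that can REACH this edge
--         reachable_backward = bfs_reachable(start_edge, backward)
--
--         # Strongly connected = intersection (can go both ways)
--         strongly_connected = reachable_forward & reachable_backward
--
--         if len(strongly_connected) > len(best_cluster):
--             best_cluster = strongly_connected
--
--         tested.update(strongly_connected)
--
--     return best_cluster
-- ===== SOURCE B (Python) =====
-- def _closure(start, adj):
--     """All nodes reachable from start, by level-synchronised frontier expansion."""
--     seen = set()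
--     frontier = [start]
--     while frontier:
--         nxt = []
--         for node in frontier:
--             if node in seen:
--                 continue
--             seen.add(node)
--             for nb in adj.get(node, []):
--                 if nb not in seen:
--                     nxt.append(nb)
--         frontier = nxt
--     return seen
--
--
-- def find_strongly_connected(edges, forward, backward):
--     """Largest mutually-reachable cluster: take the first size-maximal
--     forward-closure/backward-closure intersection over the edges with one max()."""
--     def cluster(e):
--         back = _closure(e, backward)
--         return {n for n in _closure(e, forward) if n in back}
--     return max(map(cluster, edges), key=len, default=set())
-- ===== Notes on version B (the rewrite author's own statement) =====
-- stated objective: alternative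
-- what changed: B drops A's running-best/tested-set selection loop (proved redundant: a pruned start's cluster is contained in an earlier cluster, so it can never strictly win) in favour of one max(key=len) over mapped clusters, computes each closure by level-synchronised frontier expansion instead of A's deque-based node-at-a-time BFS, and forms the intersection by a set comprehension over the forward closure; forward/backward are arbitrary graphs, so a Tarjan/Kosaraju SCC pass would not compute the same function and B keeps the same asymptotic cost.
import Mathlib
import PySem

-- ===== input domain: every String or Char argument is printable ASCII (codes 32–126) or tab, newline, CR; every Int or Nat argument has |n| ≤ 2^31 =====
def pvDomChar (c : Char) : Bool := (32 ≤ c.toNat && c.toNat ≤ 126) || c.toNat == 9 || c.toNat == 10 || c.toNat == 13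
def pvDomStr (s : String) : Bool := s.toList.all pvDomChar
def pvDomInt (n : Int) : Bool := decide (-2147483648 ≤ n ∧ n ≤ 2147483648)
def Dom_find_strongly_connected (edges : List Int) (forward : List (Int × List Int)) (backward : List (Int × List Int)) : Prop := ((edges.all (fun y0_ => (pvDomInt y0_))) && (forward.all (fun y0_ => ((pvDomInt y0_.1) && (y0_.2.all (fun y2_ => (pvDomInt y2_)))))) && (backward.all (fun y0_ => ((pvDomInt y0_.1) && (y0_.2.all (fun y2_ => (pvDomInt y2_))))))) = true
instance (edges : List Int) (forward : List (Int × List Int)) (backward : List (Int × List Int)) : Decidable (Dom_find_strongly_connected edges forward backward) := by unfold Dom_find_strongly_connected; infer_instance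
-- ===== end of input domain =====

-- B keeps A's return value on every input but replaces A's running-best/tested-set loop by a
-- single max(key=len) over per-edge clusters (the pruning is proved redundant) and computes each
-- closure by level-synchronised frontier expansion; objective: alternative (same asymptotic cost).

-- ===== PORT A =====
-- (these two lemmas are cited by both ports' decreasing_by, so they stay above the ports)
theorem pvGetD_mem_flatMap (g : List (Int × List Int)) (n : Int) :
    ∀ x ∈ (PySem.Dict.mk g).getD n [], x ∈ g.flatMap (fun p => p.2) := by
  intro x hx
  unfold PySem.Dict.getD PySem.Dict.get? at hx
  cases hf : List.find? (fun p => p.1 == n) (PySem.Dict.mk g).items with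
  | none => simp [hf] at hx
  | some p =>
    simp [hf] at hx
    exact List.mem_flatMap.mpr ⟨p, List.mem_of_find?_eq_some hf, hx⟩

theorem pvGetD_length_le (g : List (Int × List Int)) (n : Int) :
    ((PySem.Dict.mk g).getD n []).length ≤ (g.flatMap (fun p => p.2)).length := by
  unfold PySem.Dict.getD PySem.Dict.get?
  cases hf : List.find? (fun p => p.1 == n) (PySem.Dict.mk g).items with
  | none => simp [hf]
  | some p =>
    simp [hf, List.length_flatMap]
    exact List.le_sum_of_mem (List.mem_map_of_mem (List.mem_of_find?_eq_some hf))

-- the arithmetic of A's BFS termination measure, cited by bfsAux's decreasing_by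
theorem pvMeasure_step (V visited rest nbrs : List Int) (node : Int)
    (hn : ∀ x ∈ nbrs, x ∈ V) (hlen : nbrs.length ≤ V.length)
    (hv : visited.contains node = false) :
    ((V.filter (fun x => !(visited ++ [node]).contains x)).length) * (V.length + 1)
      + (((rest ++ nbrs).filter (fun x => !V.contains x)).length) * (V.length + 1)
      + (rest ++ nbrs).length
    < ((V.filter (fun x => !visited.contains x)).length) * (V.length + 1)
      + (((node :: rest).filter (fun x => !V.contains x)).length) * (V.length + 1)
      + (node :: rest).length := by
  have hnotmem : node ∉ visited := by simpa using hv
  have hfilt : V.filter (fun x => !(visited ++ [node]).contains x)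
      = (V.filter (fun x => !visited.contains x)).filter (fun x => !decide (x = node)) := by
    simp [List.filter_filter]
    apply List.filter_congr
    intro x _
    simp [Bool.and_comm]
  have hnb : (nbrs.filter (fun x => !V.contains x)) = [] := by
    rw [List.filter_eq_nil_iff]
    intro x hx
    simp [hn x hx]
  have hsplit : ((rest ++ nbrs).filter (fun x => !V.contains x)) = rest.filter (fun x => !V.contains x) := by
    rw [List.filter_append, hnb, List.append_nil]
  rw [hfilt, hsplit, List.filter_cons, List.length_append, List.length_cons]
  by_cases hV : node ∈ V
  · have hstrict : ((V.filter (fun x => !visited.contains x)).filter (fun x => !decide (x = node))).length + 1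
        ≤ (V.filter (fun x => !visited.contains x)).length := by
      apply List.length_filter_lt_length_iff_exists.mpr
      exact ⟨node, List.mem_filter.mpr ⟨hV, by simp [hnotmem]⟩, by simp⟩
    have hmul := Nat.mul_le_mul_right (V.length + 1) hstrict
    rw [Nat.add_mul] at hmul
    have hVc : (!V.contains node) = false := by simp [hV]
    rw [hVc, if_neg Bool.false_ne_true]
    omega
  · have hVc : (!V.contains node) = true := by simp [hV]
    rw [hVc, if_pos rfl, List.length_cons, Nat.add_mul]
    have hle : ((V.filter (fun x => !visited.contains x)).filter (fun x => !decide (x = node))).length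
        ≤ (V.filter (fun x => !visited.contains x)).length := List.length_filter_le _ _
    have hmul := Nat.mul_le_mul_right (V.length + 1) hle
    omega

theorem pvMeasure_skip (V visited rest : List Int) (node : Int) :
    ((V.filter (fun x => !visited.contains x)).length) * (V.length + 1)
      + ((rest.filter (fun x => !V.contains x)).length) * (V.length + 1)
      + rest.length
    < ((V.filter (fun x => !visited.contains x)).length) * (V.length + 1)
      + (((node :: rest).filter (fun x => !V.contains x)).length) * (V.length + 1)
      + (node :: rest).length := by
  simp only [List.filter_cons, List.length_cons]
  split <;> simp [Nat.add_mul] <;> omega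

-- while queue: pop; skip if visited; else visit and push the not-yet-visited neighbours
def bfsAux (g : List (Int × List Int)) (queue visited : List Int) : List Int :=
  match queue with
  | [] => visited
  | node :: rest =>
    if h : visited.contains node then
      bfsAux g rest visited
    else
      let visited' := PySem.Set.add visited node
      bfsAux g (rest ++ ((PySem.Dict.mk g).getD node []).filter (fun m => !visited'.contains m)) visited'
termination_by
  ((g.flatMap (fun p => p.2)).filter (fun x => !visited.contains x)).length * ((g.flatMap (fun p => p.2)).length + 1)
    + (queue.filter (fun x => !(g.flatMap (fun p => p.2)).contains x)).length * ((g.flatMap (fun p => p.2)).length + 1)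
    + queue.length
decreasing_by
  · exact pvMeasure_skip _ _ _ _
  · have hadd : PySem.Set.add visited node = visited ++ [node] := by
      simp [PySem.Set.add, PySem.Set.contains]
      simpa using h
    simp only [hadd]
    exact pvMeasure_step _ _ _ _ _
      (fun x hx => pvGetD_mem_flatMap g node x (List.mem_of_mem_filter hx))
      (le_trans (List.length_filter_le _ _) (pvGetD_length_le g node))
      (by simpa using h)

def bfs_reachable (start : Int) (connections : List (Int × List Int)) : PySem.Set Int :=
  bfsAux connections [start] []

def find_strongly_connected (edges : List Int) (forward : List (Int × List Int)) (backward : List (Int × List Int)) : List Int :=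
  (edges.foldl
    (fun (st : PySem.Set Int × PySem.Set Int) start_edge =>
      if PySem.Set.contains st.2 start_edge then st
      else
        let reachable_forward := bfs_reachable start_edge forward
        let reachable_backward := bfs_reachable start_edge backward
        let strongly_connected := PySem.Set.inter reachable_forward reachable_backward
        let best_cluster := if PySem.Set.len st.1 < PySem.Set.len strongly_connected then strongly_connected else st.1
        (best_cluster, PySem.Set.update st.2 strongly_connected))
    (PySem.Set.empty, PySem.Set.empty)).1

-- ===== PORT B =====
-- one frontier node processed: skip if seen, else mark seen and queue its unseen neighbours
def frontierStep (g : List (Int × List Int)) (st : List Int × List Int) (node : Int) : List Int × List Int :=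
  if PySem.Set.contains st.1 node then st
  else
    let seen' := PySem.Set.add st.1 node
    (seen', st.2 ++ ((PySem.Dict.mk g).getD node []).filter (fun nb => !PySem.Set.contains seen' nb))

-- facts about one frontier round, cited by closureAux's decreasing_by
theorem pvFold_seen_prefix (g : List (Int × List Int)) :
    ∀ (f : List Int) (st : List Int × List Int), ∃ d, (f.foldl (frontierStep g) st).1 = st.1 ++ d := by
  intro f
  induction f with
  | nil => intro st; exact ⟨[], by simp⟩
  | cons node rest ih =>
    intro st
    rw [List.foldl_cons]
    obtain ⟨d, hd⟩ := ih (frontierStep g st node)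
    unfold frontierStep at hd ⊢
    by_cases h : PySem.Set.contains st.1 node = true
    · rw [if_pos h] at hd ⊢; exact ⟨d, hd⟩
    · rw [if_neg h] at hd ⊢
      refine ⟨node :: d, ?_⟩
      rw [hd]
      have : PySem.Set.add st.1 node = st.1 ++ [node] := by
        simp [PySem.Set.add]; simpa using h
      simp [this]

theorem pvFold_next_flatMap (g : List (Int × List Int)) :
    ∀ (f : List Int) (st : List Int × List Int), ∃ d, (f.foldl (frontierStep g) st).2 = st.2 ++ d ∧
      ∀ x ∈ d, x ∈ g.flatMap (fun p => p.2) := by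
  intro f
  induction f with
  | nil => intro st; exact ⟨[], by simp⟩
  | cons node rest ih =>
    intro st
    rw [List.foldl_cons]
    obtain ⟨d, hd, hmem⟩ := ih (frontierStep g st node)
    unfold frontierStep at hd ⊢
    by_cases h : PySem.Set.contains st.1 node = true
    · rw [if_pos h] at hd ⊢; exact ⟨d, hd, hmem⟩
    · rw [if_neg h] at hd ⊢
      refine ⟨((PySem.Dict.mk g).getD node []).filter _ ++ d, by simpa using hd, ?_⟩
      intro x hx
      rcases List.mem_append.mp hx with hx' | hx'
      · exact pvGetD_mem_flatMap g node x (List.mem_of_mem_filter hx')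
      · exact hmem x hx'

theorem pvFold_visits (g : List (Int × List Int)) :
    ∀ (f : List Int) (st : List Int × List Int) (x : Int), x ∈ f →
      PySem.Set.contains st.1 x = false → x ∈ (f.foldl (frontierStep g) st).1 := by
  intro f
  induction f with
  | nil => intro st x hx; simp at hx
  | cons node rest ih =>
    intro st x hx hc
    rw [List.foldl_cons]
    by_cases h : PySem.Set.contains st.1 node = true
    · have hstep : frontierStep g st node = st := by unfold frontierStep; rw [if_pos h]
      rw [hstep]
      rcases List.mem_cons.mp hx with rfl | hx'
      · rw [h] at hc; exact absurd hc (by simp)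
      · exact ih st x hx' hc
    · have hadd : PySem.Set.add st.1 node = st.1 ++ [node] := by
        simp [PySem.Set.add]; simpa using h
      have hstep1 : (frontierStep g st node).1 = st.1 ++ [node] := by
        unfold frontierStep; rw [if_neg h]; exact hadd
      rcases List.mem_cons.mp hx with rfl | hx'
      · obtain ⟨d, hd⟩ := pvFold_seen_prefix g rest (frontierStep g st x)
        rw [hd, hstep1]
        simp
      · by_cases hxn : PySem.Set.contains (frontierStep g st node).1 x = true
        · obtain ⟨d, hd⟩ := pvFold_seen_prefix g rest (frontierStep g st node)
          rw [hd]
          exact List.mem_append_left _ (by simpa [PySem.Set.contains] using hxn)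
        · exact ih (frontierStep g st node) x hx' (by simpa using hxn)

theorem pvFold_allseen (g : List (Int × List Int)) :
    ∀ (f : List Int) (st : List Int × List Int),
      (∀ x ∈ f, PySem.Set.contains st.1 x = true) → f.foldl (frontierStep g) st = st := by
  intro f
  induction f with
  | nil => intro st _; rfl
  | cons node rest ih =>
    intro st hall
    rw [List.foldl_cons]
    have hstep : frontierStep g st node = st := by
      unfold frontierStep; rw [if_pos (hall node List.mem_cons_self)]
    rw [hstep]
    exact ih st (fun x hx => hall x (List.mem_cons_of_mem _ hx))

theorem pvFilter_length_le (V : List Int) (p q : Int → Bool) (himp : ∀ a, p a = true → q a = true) :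
    (V.filter p).length ≤ (V.filter q).length := by
  induction V with
  | nil => simp
  | cons a t ih =>
    simp only [List.filter_cons]
    by_cases hp : p a = true
    · rw [if_pos hp, if_pos (himp a hp)]; simpa using ih
    · rw [if_neg hp]
      split
      · exact le_trans ih (by simp)
      · exact ih

theorem pvFilter_length_lt (V : List Int) (p q : Int → Bool) (himp : ∀ a, p a = true → q a = true)
    (x : Int) (hx : x ∈ V) (hpx : p x = false) (hqx : q x = true) :
    (V.filter p).length < (V.filter q).length := by
  induction V with
  | nil => simp at hx
  | cons a t ih =>
    simp only [List.filter_cons]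
    rcases List.mem_cons.mp hx with rfl | hx'
    · rw [hpx, if_neg Bool.false_ne_true, if_pos hqx]
      exact Nat.lt_succ_of_le (pvFilter_length_le t p q himp)
    · have hlt := ih hx'
      by_cases hp : p a = true
      · rw [if_pos hp, if_pos (himp a hp)]; simpa using hlt
      · rw [if_neg hp]
        split
        · exact lt_of_lt_of_le hlt (by simp)
        · exact hlt

-- the frontier-round measure strictly decreases; cited by closureAux's decreasing_by
theorem pvFrontierDec (g : List (Int × List Int)) (node : Int) (rest seen : List Int) :
    (((g.flatMap (fun p => p.2)).filter (fun x => !((node :: rest).foldl (frontierStep g) (seen, [])).1.contains x)).length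
      + ((((node :: rest).foldl (frontierStep g) (seen, [])).2).filter
          (fun x => !((node :: rest).foldl (frontierStep g) (seen, [])).1.contains x && !(g.flatMap (fun p => p.2)).contains x)).length) * 2
      + (if (((node :: rest).foldl (frontierStep g) (seen, [])).2).isEmpty then 0 else 1)
    < (((g.flatMap (fun p => p.2)).filter (fun x => !seen.contains x)).length
      + ((node :: rest).filter (fun x => !seen.contains x && !(g.flatMap (fun p => p.2)).contains x)).length) * 2
      + 1 := by
  set V := g.flatMap (fun p => p.2) with hV
  set st := (node :: rest).foldl (frontierStep g) (seen, []) with hst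
  have hflag : (if st.2.isEmpty then 0 else 1) ≤ 1 := by split <;> omega
  obtain ⟨d2, hd2, hd2V⟩ := pvFold_next_flatMap g (node :: rest) (seen, [])
  have hB' : (st.2.filter (fun x => !st.1.contains x && !V.contains x)).length = 0 := by
    rw [List.length_eq_zero_iff, List.filter_eq_nil_iff]
    intro x hx
    rw [hd2] at hx
    have : x ∈ V := hd2V x (by simpa using hx)
    simp [this]
  obtain ⟨d, hd⟩ := pvFold_seen_prefix g (node :: rest) (seen, [])
  have himp : ∀ a, (!st.1.contains a) = true → (!seen.contains a) = true := by
    intro a ha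
    have h1 : a ∉ st.1 := by simpa using ha
    have hd' : st.1 = seen ++ d := hd
    rw [hd'] at h1
    simp only [List.mem_append, not_or] at h1
    simpa using h1.1
  by_cases hall : ∀ x ∈ node :: rest, PySem.Set.contains seen x = true
  · have hfold : st = (seen, []) := pvFold_allseen g (node :: rest) (seen, []) hall
    have hBold : ((node :: rest).filter (fun x => !seen.contains x && !V.contains x)) = [] := by
      rw [List.filter_eq_nil_iff]
      intro x hx
      have := hall x hx
      simp [PySem.Set.contains] at this
      simp [this]
    rw [hB', hBold, hfold]
    simp
  · push_neg at hall
    obtain ⟨x, hxf, hxc⟩ := hall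
    have hxc' : PySem.Set.contains seen x = false := by simpa using hxc
    have hxin : x ∈ st.1 := pvFold_visits g (node :: rest) (seen, []) x hxf hxc'
    rw [hB']
    by_cases hxV : x ∈ V
    · have hlt := pvFilter_length_lt V (fun a => !st.1.contains a) (fun a => !seen.contains a)
        himp x hxV (by simpa using hxin) (by simpa [PySem.Set.contains] using hxc')
      omega
    · have hle := pvFilter_length_le V (fun a => !st.1.contains a) (fun a => !seen.contains a) himp
      have hBold : 1 ≤ ((node :: rest).filter (fun x => !seen.contains x && !V.contains x)).length := by
        have : x ∈ (node :: rest).filter (fun x => !seen.contains x && !V.contains x) :=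
          List.mem_filter.mpr ⟨hxf, by simp [PySem.Set.contains] at hxc'; simp [hxc', hxV]⟩
        exact List.length_pos_of_mem this
      omega

-- while frontier: one pass over the whole frontier, collecting the next frontier
def closureAux (g : List (Int × List Int)) (frontier seen : List Int) : List Int :=
  match frontier with
  | [] => seen
  | node :: rest =>
    let st := (node :: rest).foldl (frontierStep g) (seen, [])
    closureAux g st.2 st.1
termination_by
  (((g.flatMap (fun p => p.2)).filter (fun x => !seen.contains x)).length
    + (frontier.filter (fun x => !seen.contains x && !(g.flatMap (fun p => p.2)).contains x)).length) * 2
    + (if frontier.isEmpty then 0 else 1)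
decreasing_by
  simpa using pvFrontierDec g node rest seen

def pvClosureB (start : Int) (adj : List (Int × List Int)) : PySem.Set Int :=
  closureAux adj [start] []

def pvClusterB (forward backward : List (Int × List Int)) (e : Int) : List Int :=
  let back := pvClosureB e backward
  (pvClosureB e forward).filter (fun n => PySem.Set.contains back n)

def find_strongly_connected_alt (edges : List Int) (forward : List (Int × List Int)) (backward : List (Int × List Int)) : List Int :=
  PySem.List.maxD (edges.map (pvClusterB forward backward)) (fun c => (c.length : Int)) []

-- ===== PRECONDITION & SPEC =====
def Spec_find_strongly_connected (edges : List Int) (forward : List (Int × List Int)) (backward : List (Int × List Int)) (out : List Int) : Prop := out = find_strongly_connected_alt edges forward backward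
instance (edges : List Int) (forward : List (Int × List Int)) (backward : List (Int × List Int)) (out : List Int) : Decidable (Spec_find_strongly_connected edges forward backward out) := by unfold Spec_find_strongly_connected; infer_instance

-- ===== CLAIM (what is proved, stated in full; the proofs are below) =====
def Claim_equal_find_strongly_connected : Prop := ∀ (edges : List Int) (forward : List (Int × List Int)) (backward : List (Int × List Int)), Dom_find_strongly_connected edges forward backward → Spec_find_strongly_connected edges forward backward (find_strongly_connected edges forward backward)

-- ===== LEMMAS AND PROOFS =====

-- B's frontier rounds walk A's BFS queue: folding a frontier block equals consuming it node by node
theorem bfsAux_eq_foldl (g : List (Int × List Int)) :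
    ∀ (f seen nxt : List Int),
      bfsAux g (f ++ nxt) seen
        = bfsAux g (f.foldl (frontierStep g) (seen, nxt)).2 (f.foldl (frontierStep g) (seen, nxt)).1 := by
  intro f
  induction f with
  | nil => intro seen nxt; simp
  | cons node rest ih =>
    intro seen nxt
    rw [List.cons_append, bfsAux, List.foldl_cons]
    by_cases h : seen.contains node = true
    · rw [dif_pos h]
      have hstep : frontierStep g (seen, nxt) node = (seen, nxt) := by
        unfold frontierStep
        rw [if_pos (by simpa [PySem.Set.contains] using h)]
      rw [hstep]
      exact ih seen nxt
    · rw [dif_neg h]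
      have hstep : frontierStep g (seen, nxt) node
          = (PySem.Set.add seen node,
             nxt ++ ((PySem.Dict.mk g).getD node []).filter (fun m => !(PySem.Set.add seen node).contains m)) := by
        unfold frontierStep
        rw [if_neg (by simpa [PySem.Set.contains] using h)]
      rw [hstep]
      have := ih (PySem.Set.add seen node)
        (nxt ++ ((PySem.Dict.mk g).getD node []).filter (fun m => !(PySem.Set.add seen node).contains m))
      simpa [List.append_assoc] using this

theorem closureAux_eq_bfsAux (g : List (Int × List Int)) (frontier seen : List Int) :
    closureAux g frontier seen = bfsAux g frontier seen := by
  fun_induction closureAux g frontier seen with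
  | case1 seen => rw [bfsAux]
  | case2 seen node rest st ih =>
    rw [ih]
    have := bfsAux_eq_foldl g (node :: rest) seen []
    simpa using this.symm

theorem pvClosureB_eq (start : Int) (adj : List (Int × List Int)) :
    pvClosureB start adj = bfs_reachable start adj := by
  unfold pvClosureB bfs_reachable
  exact closureAux_eq_bfsAux adj [start] []

-- one step of the forward/backward edge relation, and reachability
def pvEdge (g : List (Int × List Int)) (a b : Int) : Prop := b ∈ (PySem.Dict.mk g).getD a []
def pvReach (g : List (Int × List Int)) : Int → Int → Prop := Relation.ReflTransGen (pvEdge g)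

theorem bfsAux_mem_of_mem_visited (g : List (Int × List Int)) (queue visited : List Int)
    (x : Int) (hx : x ∈ visited) : x ∈ bfsAux g queue visited := by
  fun_induction bfsAux g queue visited generalizing x with
  | case1 => simpa using hx
  | case2 _ _ _ _ ih => exact ih _ hx
  | case3 visited node rest h v' ih =>
    exact ih x ((PySem.Set.mem_add visited node x).mpr (Or.inl hx))

theorem bfsAux_mem_of_mem_queue (g : List (Int × List Int)) (queue visited : List Int)
    (x : Int) (hx : x ∈ queue) : x ∈ bfsAux g queue visited := by
  fun_induction bfsAux g queue visited generalizing x with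
  | case1 => simp at hx
  | case2 visited node rest h ih =>
    rcases List.mem_cons.mp hx with rfl | hx'
    · exact bfsAux_mem_of_mem_visited _ _ _ _ (by simpa using h)
    · exact ih x hx'
  | case3 visited node rest h v' ih =>
    rcases List.mem_cons.mp hx with rfl | hx'
    · exact bfsAux_mem_of_mem_visited _ _ _ _ ((PySem.Set.mem_add visited x x).mpr (Or.inr rfl))
    · exact ih x (List.mem_append_left _ hx')

theorem pvGetD_mem_of_mem_filter' {g : List (Int × List Int)} {node : Int} {p : Int → Bool} {m : Int}
    (hx : m ∈ ((PySem.Dict.mk g).getD node []).filter p) : pvEdge g node m :=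
  List.mem_of_mem_filter hx

theorem bfsAux_sound (g : List (Int × List Int)) (s : Int) (queue visited : List Int)
    (hq : ∀ x ∈ queue, pvReach g s x) (hv : ∀ x ∈ visited, pvReach g s x) :
    ∀ x ∈ bfsAux g queue visited, pvReach g s x := by
  revert hq hv
  fun_induction bfsAux g queue visited with
  | case1 => intro hq hv; exact hv
  | case2 visited node rest h ih =>
    intro hq hv
    exact ih (fun x hx => hq x (List.mem_cons_of_mem _ hx)) hv
  | case3 visited node rest h v' ih =>
    intro hq hv
    apply ih
    · intro x hx
      rcases List.mem_append.mp hx with hx' | hx'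
      · exact hq x (List.mem_cons_of_mem _ hx')
      · exact (hq node List.mem_cons_self).tail (pvGetD_mem_of_mem_filter' hx')
    · intro x hx
      rcases (PySem.Set.mem_add visited node x).mp hx with hx' | rfl
      · exact hv x hx'
      · exact hq x List.mem_cons_self

theorem bfsAux_closed (g : List (Int × List Int)) (queue visited : List Int)
    (hinv : ∀ t ∈ visited, ∀ m, pvEdge g t m → m ∈ visited ∨ m ∈ queue) :
    ∀ t ∈ bfsAux g queue visited, ∀ m, pvEdge g t m → m ∈ bfsAux g queue visited := by
  revert hinv
  fun_induction bfsAux g queue visited with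
  | case1 =>
    intro hinv t ht m hm
    rcases hinv t ht m hm with h' | h'
    · exact h'
    · simp at h'
  | case2 visited node rest h ih =>
    intro hinv
    apply ih
    intro t ht m hm
    rcases hinv t ht m hm with h' | h'
    · exact Or.inl h'
    · rcases List.mem_cons.mp h' with rfl | h''
      · exact Or.inl (by simpa using h)
      · exact Or.inr h''
  | case3 visited node rest h v' ih =>
    intro hinv
    apply ih
    intro t ht m hm
    rcases (PySem.Set.mem_add visited node t).mp ht with ht' | rfl
    · rcases hinv t ht' m hm with h' | h'
      · exact Or.inl ((PySem.Set.mem_add visited node m).mpr (Or.inl h'))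
      · rcases List.mem_cons.mp h' with rfl | h''
        · exact Or.inl ((PySem.Set.mem_add visited m m).mpr (Or.inr rfl))
        · exact Or.inr (List.mem_append_left _ h'')
    · by_cases hc : (PySem.Set.add visited t).contains m = true
      · exact Or.inl ((PySem.Set.mem_add visited t m).mpr (by simpa using hc))
      · refine Or.inr (List.mem_append_right _ ?_)
        refine List.mem_filter.mpr ⟨hm, ?_⟩
        show (!((PySem.Set.add visited t).contains m)) = true
        simpa using hc

theorem mem_bfs_reachable_iff (g : List (Int × List Int)) (s x : Int) :
    x ∈ bfs_reachable s g ↔ pvReach g s x := by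
  constructor
  · intro h
    refine bfsAux_sound g s [s] [] ?_ (by simp) x h
    intro y hy
    rcases List.mem_cons.mp hy with rfl | hy'
    · exact Relation.ReflTransGen.refl
    · simp at hy'
  · intro h
    induction h with
    | refl => exact bfsAux_mem_of_mem_queue _ _ _ _ (by simp)
    | tail _ hbc ih => exact bfsAux_closed g [s] [] (by simp) _ ih _ hbc

theorem nodup_bfsAux (g : List (Int × List Int)) (queue visited : List Int)
    (hv : visited.Nodup) : (bfsAux g queue visited).Nodup := by
  revert hv
  fun_induction bfsAux g queue visited with
  | case1 => intro hv; exact hv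
  | case2 visited node rest h ih => exact ih
  | case3 visited node rest h v' ih =>
    intro hv
    apply ih
    show (PySem.Set.add visited node).Nodup
    have : node ∉ visited := by simpa using h
    simp [PySem.Set.add, PySem.Set.contains, List.nodup_append, this, hv]
    exact fun a ha hae => this (hae ▸ ha)

-- A's per-edge cluster
def pvScc (forward backward : List (Int × List Int)) (e : Int) : List Int :=
  PySem.Set.inter (bfs_reachable e forward) (bfs_reachable e backward)

theorem pvClusterB_eq_scc (forward backward : List (Int × List Int)) (e : Int) :
    pvClusterB forward backward e = pvScc forward backward e := by
  unfold pvClusterB pvScc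
  rw [pvClosureB_eq, pvClosureB_eq]
  rfl

theorem pvScc_nodup (forward backward : List (Int × List Int)) (e : Int) :
    (pvScc forward backward e).Nodup := by
  unfold pvScc PySem.Set.inter bfs_reachable
  exact (nodup_bfsAux forward [e] [] List.nodup_nil).filter _

theorem self_mem_pvScc (forward backward : List (Int × List Int)) (e : Int) :
    e ∈ pvScc forward backward e := by
  have h1 : e ∈ bfs_reachable e forward := bfsAux_mem_of_mem_queue _ _ _ _ (by simp)
  have h2 : e ∈ bfs_reachable e backward := bfsAux_mem_of_mem_queue _ _ _ _ (by simp)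
  exact List.mem_filter.mpr ⟨h1, by simpa [PySem.Set.contains] using h2⟩

theorem pvScc_length_le (forward backward : List (Int × List Int)) (e t : Int)
    (ht : t ∈ pvScc forward backward e) :
    (pvScc forward backward t).length ≤ (pvScc forward backward e).length := by
  have ht1 : pvReach forward e t := (mem_bfs_reachable_iff forward e t).mp (List.mem_of_mem_filter ht)
  have ht2 : pvReach backward e t := (mem_bfs_reachable_iff backward e t).mp
    (by simpa [PySem.Set.contains] using (List.mem_filter.mp ht).2)
  have hsub : pvScc forward backward t ⊆ pvScc forward backward e := by
    intro x hx
    have hx1 : pvReach forward t x := (mem_bfs_reachable_iff forward t x).mp (List.mem_of_mem_filter hx)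
    have hx2 : pvReach backward t x := (mem_bfs_reachable_iff backward t x).mp
      (by simpa [PySem.Set.contains] using (List.mem_filter.mp hx).2)
    refine List.mem_filter.mpr ⟨(mem_bfs_reachable_iff forward e x).mpr (ht1.trans hx1), ?_⟩
    simpa [PySem.Set.contains] using (mem_bfs_reachable_iff backward e x).mpr (ht2.trans hx2)
  have h1 := pvScc_nodup forward backward t
  calc (pvScc forward backward t).length = (pvScc forward backward t).toFinset.card := by
        rw [List.toFinset_card_of_nodup h1]
    _ ≤ (pvScc forward backward e).toFinset.card := Finset.card_le_card (fun x hx => by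
        simp only [List.mem_toFinset] at *; exact hsub hx)
    _ ≤ (pvScc forward backward e).length := (pvScc forward backward e).toFinset_card_le

-- the common selection loop both proofs are reduced to
def pvStep (forward backward : List (Int × List Int)) (best : List Int) (e : Int) : List Int :=
  if best.length < (pvScc forward backward e).length then pvScc forward backward e else best

def pvStepA (forward backward : List (Int × List Int)) (st : PySem.Set Int × PySem.Set Int) (start_edge : Int) : PySem.Set Int × PySem.Set Int :=
  if PySem.Set.contains st.2 start_edge then st
  else
    let reachable_forward := bfs_reachable start_edge forward
    let reachable_backward := bfs_reachable start_edge backward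
    let strongly_connected := PySem.Set.inter reachable_forward reachable_backward
    let best_cluster := if PySem.Set.len st.1 < PySem.Set.len strongly_connected then strongly_connected else st.1
    (best_cluster, PySem.Set.update st.2 strongly_connected)

theorem find_strongly_connected_eq_fold (edges : List Int) (forward backward : List (Int × List Int)) :
    find_strongly_connected edges forward backward
      = (edges.foldl (pvStepA forward backward) (PySem.Set.empty, PySem.Set.empty)).1 := rfl

theorem pvStep_ge_best (forward backward : List (Int × List Int)) (best : List Int) (e : Int) :
    best.length ≤ (pvStep forward backward best e).length := by
  unfold pvStep
  split
  · next h1 => exact Nat.le_of_lt h1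
  · exact Nat.le_refl _

theorem pvStep_ge_scc (forward backward : List (Int × List Int)) (best : List Int) (e : Int) :
    (pvScc forward backward e).length ≤ (pvStep forward backward best e).length := by
  unfold pvStep
  split
  · exact Nat.le_refl _
  · next h1 => exact Nat.le_of_not_lt h1

-- A's tested-set pruning is redundant: a pruned start's cluster never strictly wins
theorem pvFold_eq (forward backward : List (Int × List Int)) (edges : List Int)
    (best tested : List Int)
    (hinv : ∀ t ∈ tested, (pvScc forward backward t).length ≤ best.length) :
    (edges.foldl (pvStepA forward backward) (best, tested)).1
      = edges.foldl (pvStep forward backward) best := by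
  induction edges generalizing best tested with
  | nil => rfl
  | cons e es ih =>
    rw [List.foldl_cons, List.foldl_cons]
    by_cases hc : PySem.Set.contains tested e = true
    · have hstep : pvStepA forward backward (best, tested) e = (best, tested) := by
        unfold pvStepA
        rw [if_pos hc]
      have hle : (pvScc forward backward e).length ≤ best.length :=
        hinv e (by simpa [PySem.Set.contains] using hc)
      have hstep2 : pvStep forward backward best e = best := by
        unfold pvStep
        rw [if_neg (Nat.not_lt.mpr hle)]
      rw [hstep, hstep2]
      exact ih best tested hinv
    · have hstep : pvStepA forward backward (best, tested) e
          = (if PySem.Set.len best < PySem.Set.len (pvScc forward backward e)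
              then pvScc forward backward e else best,
             PySem.Set.update tested (pvScc forward backward e)) := by
        simp only [pvStepA, hc, if_false, Bool.false_eq_true]
        rfl
      have hbest : (if PySem.Set.len best < PySem.Set.len (pvScc forward backward e)
            then pvScc forward backward e else best) = pvStep forward backward best e := by
        unfold pvStep
        by_cases hl : best.length < (pvScc forward backward e).length
        · rw [if_pos (by simpa [PySem.Set.len] using hl), if_pos hl]
        · rw [if_neg (by simpa [PySem.Set.len] using hl), if_neg hl]
      rw [hstep, hbest]
      apply ih
      intro t htm
      rcases (PySem.Set.mem_update tested (pvScc forward backward e) t).mp htm with htd | hts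
      · exact le_trans (hinv t htd) (pvStep_ge_best forward backward best e)
      · exact le_trans (pvScc_length_le forward backward e t hts) (pvStep_ge_scc forward backward best e)

theorem pvOptFold (forward backward : List (Int × List Int)) (es : List Int)
    (optf : Option (List Int) → Int → Option (List Int))
    (hs : ∀ m x, optf (some m) x
      = if ((m.length : Int)) < (((pvScc forward backward x).length : Int))
          then some (pvScc forward backward x) else some m) :
    ∀ best : List Int,
      es.foldl optf (some best) = some (es.foldl (pvStep forward backward) best) := by
  induction es with
  | nil => intro best; rfl
  | cons e t ih =>
    intro best
    rw [List.foldl_cons, List.foldl_cons, hs]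
    have hred : (if ((best.length : Int)) < (((pvScc forward backward e).length : Int))
          then some (pvScc forward backward e) else some best)
        = some (pvStep forward backward best e) := by
      unfold pvStep
      by_cases hl : best.length < (pvScc forward backward e).length
      · rw [if_pos (by exact_mod_cast hl), if_pos hl]
      · rw [if_neg (by exact_mod_cast hl), if_neg hl]
    rw [hred]
    exact ih _

theorem pvOptFoldAll (forward backward : List (Int × List Int)) (es : List Int)
    (optf : Option (List Int) → Int → Option (List Int))
    (hf : ∀ x, optf none x = some (pvScc forward backward x))
    (hs : ∀ m x, optf (some m) x
      = if ((m.length : Int)) < (((pvScc forward backward x).length : Int))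
          then some (pvScc forward backward x) else some m) :
    (es.foldl optf none).getD [] = es.foldl (pvStep forward backward) [] := by
  cases es with
  | nil => rfl
  | cons e t =>
    rw [List.foldl_cons, List.foldl_cons, hf, pvOptFold forward backward t optf hs, Option.getD_some]
    have hfirst : pvStep forward backward [] e = pvScc forward backward e := by
      unfold pvStep
      rw [if_pos (by simpa using List.length_pos_of_mem (self_mem_pvScc forward backward e))]
    rw [hfirst]

theorem pvMaxD_eq (forward backward : List (Int × List Int)) (edges : List Int) :
    PySem.List.maxD (edges.map (pvClusterB forward backward)) (fun c => (c.length : Int)) []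
      = edges.foldl (pvStep forward backward) [] := by
  unfold PySem.List.maxD PySem.List.max?
  rw [List.foldl_map]
  simp only [pvClusterB_eq_scc]
  exact pvOptFoldAll forward backward edges _ (fun x => rfl) (fun m x => rfl)

-- ===== VERDICT (by name: the statement is the Claim_ definition above) =====
theorem find_strongly_connected_spec : Claim_equal_find_strongly_connected := by
  intro edges forward backward _
  unfold Spec_find_strongly_connected find_strongly_connected_alt
  rw [find_strongly_connected_eq_fold, pvMaxD_eq]
  exact pvFold_eq forward backward edges [] [] (by simp)
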